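-- pv_equiv track=rewrite | github.com/sirshivansh/brain-byte | ai_engine/timeline.py | detect_attack
-- ===== SOURCE A (Python) =====
-- def detect_attack(timeline):
--     # 🟢 FIX: Get all descriptions as lowercase strings
--     events = [step.get("description", "").lower() for step in timeline]
--
--     # 🟢 FIX: Use any() to check if the word exists INSIDE the string
--     has_login = any("login" in event for event in events)
--     has_export = any("export" in event for event in events)
--
--     login_count = sum(1 for event in events if "login" in event)
--
--     if has_login and has_export:
--         return "🚨 CRITICAL: Possible account compromise followed by data exfiltration attack."
--
--     if login_count >= 2:
--         return "⚠️ HIGH: Multiple login attempts detected. Possible brute-force attack."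
--
--     return "No clear attack pattern detected."
-- ===== SOURCE B (Python) =====
-- def detect_attack(timeline):
--     # Short-circuit state machine: a saturating login counter (capped at 2, since
--     # only the thresholds 1 and 2 matter) plus an export flag; the scan returns
--     # CRITICAL the moment the verdict is forced, instead of computing global
--     # aggregates over the whole timeline first.
--     logins = 0
--     exported = False
--     for step in timeline:
--         text = step.get("description", "").lower()
--         if "login" in text:
--             logins = min(2, logins + 1)
--         if "export" in text:
--             exported = True
--         if exported and logins >= 1:
--             return "🚨 CRITICAL: Possible account compromise followed by data exfiltration attack."
--     if logins >= 2:
--         return "⚠️ HIGH: Multiple login attempts detected. Possible brute-force attack."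
--     return "No clear attack pattern detected."
-- ===== Notes on version B (the rewrite author's own statement) =====
-- stated objective: alternative
-- what changed: Replaces A's materialised description list and three whole-list aggregate scans (any/any/sum) by a short-circuit state machine: a login counter saturating at 2 and an export flag, with an early return of CRITICAL as soon as both conditions are forced, so the tail of the timeline is never examined and no exact count is ever computed.
import Mathlib
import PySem

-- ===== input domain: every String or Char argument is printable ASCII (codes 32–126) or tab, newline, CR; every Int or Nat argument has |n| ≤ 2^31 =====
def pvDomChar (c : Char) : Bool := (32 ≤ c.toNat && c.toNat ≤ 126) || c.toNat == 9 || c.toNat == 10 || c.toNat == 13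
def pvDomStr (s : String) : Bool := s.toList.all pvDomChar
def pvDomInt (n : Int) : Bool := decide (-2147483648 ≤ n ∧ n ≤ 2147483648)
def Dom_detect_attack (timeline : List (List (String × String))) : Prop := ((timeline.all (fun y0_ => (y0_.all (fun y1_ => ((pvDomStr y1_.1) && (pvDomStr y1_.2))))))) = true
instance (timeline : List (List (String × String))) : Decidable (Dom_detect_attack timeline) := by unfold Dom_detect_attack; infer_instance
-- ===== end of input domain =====

-- B replaces A's whole-list aggregate scans by a short-circuit state machine
-- (saturating login counter, export flag, early return); same return value everywhere.

-- ===== PORT A =====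
def detect_attack (timeline : List (List (String × String))) : String :=
  -- events = [step.get("description", "").lower() for step in timeline]
  let events := timeline.map (fun step => PySem.Str.lower (PySem.Dict.getD (PySem.Dict.mk step) "description" ""))
  -- has_login = any("login" in event for event in events)
  let has_login := events.any (fun e => PySem.Str.isIn "login" e)
  -- has_export = any("export" in event for event in events)
  let has_export := events.any (fun e => PySem.Str.isIn "export" e)
  -- login_count = sum(1 for event in events if "login" in event)
  let login_count : Int := ((events.filter (fun e => PySem.Str.isIn "login" e)).map (fun _ => (1 : Int))).sum
  if has_login && has_export then
    "🚨 CRITICAL: Possible account compromise followed by data exfiltration attack."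
  else if login_count ≥ 2 then
    "⚠️ HIGH: Multiple login attempts detected. Possible brute-force attack."
  else
    "No clear attack pattern detected."

-- ===== PORT B =====
-- the for-loop of Source B with its early return, as structural recursion over the timeline
def detect_attack_go (steps : List (List (String × String))) (logins : Int) (exported : Bool) : String :=
  match steps with
  | [] =>
    if logins ≥ 2 then
      "⚠️ HIGH: Multiple login attempts detected. Possible brute-force attack."
    else
      "No clear attack pattern detected."
  | step :: rest =>
    let text := PySem.Str.lower (PySem.Dict.getD (PySem.Dict.mk step) "description" "")
    let logins' := if PySem.Str.isIn "login" text then min 2 (logins + 1) else logins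
    let exported' := if PySem.Str.isIn "export" text then true else exported
    if exported' ∧ logins' ≥ 1 then
      "🚨 CRITICAL: Possible account compromise followed by data exfiltration attack."
    else
      detect_attack_go rest logins' exported'

def detect_attack_alt (timeline : List (List (String × String))) : String :=
  detect_attack_go timeline 0 false

-- ===== PRECONDITION & SPEC =====
def Spec_detect_attack (timeline : List (List (String × String))) (out : String) : Prop := out = detect_attack_alt timeline
instance (timeline : List (List (String × String))) (out : String) : Decidable (Spec_detect_attack timeline out) := by unfold Spec_detect_attack; infer_instance

-- ===== CLAIM (what is proved, stated in full; the proofs are below) =====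
def Claim_equal_detect_attack : Prop := ∀ (timeline : List (List (String × String))), Dom_detect_attack timeline → Spec_detect_attack timeline (detect_attack timeline)

-- ===== LEMMAS AND PROOFS =====

def pvEv (step : List (String × String)) : String :=
  PySem.Str.lower (PySem.Dict.getD (PySem.Dict.mk step) "description" "")

def pvCnt (timeline : List (List (String × String))) : Int :=
  (((timeline.map pvEv).filter (fun e => PySem.Str.isIn "login" e)).map (fun _ => (1 : Int))).sum

def pvExp (timeline : List (List (String × String))) : Bool :=
  (timeline.map pvEv).any (fun e => PySem.Str.isIn "export" e)

theorem pvCnt_cons (step : List (String × String)) (rest : List (List (String × String))) :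
    pvCnt (step :: rest) = (if PySem.Str.isIn "login" (pvEv step) = true then (1 : Int) else 0) + pvCnt rest := by
  by_cases h : PySem.Str.isIn "login" (pvEv step) = true
  · simp only [pvCnt, List.map_cons, List.filter_cons, h, if_true, List.sum_cons]
  · simp only [pvCnt, List.map_cons, List.filter_cons, h, Bool.false_eq_true, if_false, zero_add]

theorem pvExp_cons (step : List (String × String)) (rest : List (List (String × String))) :
    pvExp (step :: rest) = (PySem.Str.isIn "export" (pvEv step) || pvExp rest) := by
  simp only [pvExp, List.map_cons, List.any_cons]

theorem pvCnt_nonneg (timeline : List (List (String × String))) : 0 ≤ pvCnt timeline := by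
  induction timeline with
  | nil => simp [pvCnt]
  | cons step rest ih =>
    rw [pvCnt_cons]
    by_cases h : PySem.Str.isIn "login" (pvEv step) = true <;> simp only [h] <;> omega

theorem pvAny_iff_cnt (timeline : List (List (String × String))) :
    ((timeline.map pvEv).any (fun e => PySem.Str.isIn "login" e) = true) ↔ 1 ≤ pvCnt timeline := by
  induction timeline with
  | nil => simp [pvCnt]
  | cons step rest ih =>
    rw [pvCnt_cons]
    simp only [List.map_cons, List.any_cons, Bool.or_eq_true]
    by_cases hl : PySem.Str.isIn "login" (pvEv step) = true
    · have := pvCnt_nonneg rest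
      simp only [hl, if_true, true_or, true_iff]
      omega
    · simp only [hl, Bool.false_eq_true, if_false, false_or, zero_add, ih]

-- characterisation of the early-exit state machine in terms of the global aggregates
theorem pvGo_eq (steps : List (List (String × String))) : ∀ (l : Int) (e : Bool),
    0 ≤ l → l ≤ 2 → ¬(e = true ∧ 1 ≤ l) →
    detect_attack_go steps l e =
      (if 1 ≤ l + pvCnt steps ∧ (e || pvExp steps) = true then
        "🚨 CRITICAL: Possible account compromise followed by data exfiltration attack."
      else if 2 ≤ l + pvCnt steps then
        "⚠️ HIGH: Multiple login attempts detected. Possible brute-force attack."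
      else
        "No clear attack pattern detected.") := by
  induction steps with
  | nil =>
    intro l e h0 h2 hne
    simp only [detect_attack_go, pvCnt, pvExp, List.map_nil, List.filter_nil, List.sum_nil,
      List.any_nil, Bool.or_false, add_zero, ge_iff_le]
    rw [if_neg (fun (h : 1 ≤ l ∧ e = true) => hne ⟨h.2, h.1⟩)]
  | cons step rest ih =>
    intro l e h0 h2 hne
    rw [pvCnt_cons, pvExp_cons]
    show (let text := pvEv step
          let logins' := if PySem.Str.isIn "login" text then min 2 (l + 1) else l
          let exported' := if PySem.Str.isIn "export" text then true else e
          if exported' = true ∧ logins' ≥ 1 then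
            "🚨 CRITICAL: Possible account compromise followed by data exfiltration attack."
          else detect_attack_go rest logins' exported') = _
    have hc := pvCnt_nonneg rest
    by_cases hl : PySem.Str.isIn "login" (pvEv step) = true <;>
      by_cases hx : PySem.Str.isIn "export" (pvEv step) = true <;>
        simp only [hl, hx, Bool.false_eq_true, if_true, if_false, ge_iff_le, Bool.or_true,
          Bool.true_or, Bool.false_or, true_and, and_true]
    · -- login hit, export hit: early exit fires
      rw [if_pos (by omega), if_pos (by omega)]
    · -- login hit, no export: exported' = e
      by_cases he : e = true
      · -- then l = 0 by hne: early exit fires with logins' = 1, and RHS is critical too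
        subst he
        have hl1 : ¬ 1 ≤ l := fun h => hne ⟨rfl, h⟩
        rw [if_pos ⟨rfl, by omega⟩, if_pos ⟨by omega, by simp⟩]
      · simp only [Bool.not_eq_true] at he; subst he
        rw [if_neg (by rintro ⟨h, _⟩; exact Bool.false_ne_true h)]
        rw [ih (min 2 (l + 1)) false (by omega) (by omega)
            (by rintro ⟨h, _⟩; exact Bool.false_ne_true h)]
        simp only [Bool.false_or]
        exact if_congr (and_congr (by omega) Iff.rfl) rfl (if_congr (by omega) rfl rfl)
    · -- no login, export hit: exported' = true, logins' = l
      by_cases h1 : 1 ≤ l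
      · rw [if_pos h1, if_pos (by omega)]
      · rw [if_neg h1]
        rw [ih l true h0 h2 (by rintro ⟨_, h⟩; exact h1 h)]
        simp only [Bool.true_or, zero_add, and_true]
    · -- no login, no export: state unchanged
      rw [if_neg (fun h => hne ⟨h.1, h.2⟩)]
      rw [ih l e h0 h2 hne]
      simp only [zero_add]

-- A's value written with the named aggregates (definitional)
theorem detect_attack_def (timeline : List (List (String × String))) :
    detect_attack timeline =
      (if (((timeline.map pvEv).any (fun e => PySem.Str.isIn "login" e)) && pvExp timeline) = true then
        "🚨 CRITICAL: Possible account compromise followed by data exfiltration attack."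
      else if pvCnt timeline ≥ 2 then
        "⚠️ HIGH: Multiple login attempts detected. Possible brute-force attack."
      else
        "No clear attack pattern detected.") := rfl

-- ===== VERDICT (by name: the statement is the Claim_ definition above) =====
theorem detect_attack_spec : Claim_equal_detect_attack := by
  intro timeline _
  show detect_attack timeline = detect_attack_alt timeline
  rw [detect_attack_def]
  show _ = detect_attack_go timeline 0 false
  rw [pvGo_eq timeline 0 false (by omega) (by omega)
      (by rintro ⟨h, _⟩; exact Bool.false_ne_true h)]
  simp only [zero_add, Bool.false_or, ge_iff_le, Bool.and_eq_true, pvAny_iff_cnt]
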